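-- pv_equiv track=rewrite | github.com/Darkaxt/lrcget-auto-translation | tools/autosync_eval/air_i_breathe_eval.py | impossible_timestamp_clusters
-- ===== SOURCE A (Python) =====
-- def impossible_timestamp_clusters(starts_ms: list[int], threshold_ms: int = 100, min_size: int = 3) -> tuple[int, int | None]:
--     clusters = 0
--     first_cluster_ms: int | None = None
--     current: list[int] = []
--     for start in starts_ms:
--         if not current or start - current[-1] < threshold_ms:
--             current.append(start)
--             continue
--         if len(current) >= min_size:
--             clusters += 1
--             first_cluster_ms = current[0] if first_cluster_ms is None else first_cluster_ms
--         current = [start]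
--     if len(current) >= min_size:
--         clusters += 1
--         first_cluster_ms = current[0] if first_cluster_ms is None else first_cluster_ms
--     return clusters, first_cluster_ms
-- ===== SOURCE B (Python) =====
-- def impossible_timestamp_clusters(starts_ms: list[int], threshold_ms: int = 100, min_size: int = 3) -> tuple[int, int | None]:
--     # Index arithmetic instead of run-building: compute the break indices
--     # (where the gap reaches the threshold), pad with the two ends, and read
--     # every cluster off as a pair of consecutive boundaries.
--     n = len(starts_ms)
--     bounds = [0] + [i for i in range(1, n) if starts_ms[i] - starts_ms[i - 1] >= threshold_ms] + [n]
--     big = [a for a, b in zip(bounds, bounds[1:]) if b - a >= min_size]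
--     return len(big), (starts_ms[big[0]] if big else None)
-- ===== Notes on version B (the rewrite author's own statement) =====
-- stated objective: alternative
-- what changed: Replaces A's stateful single pass (growing a current-cluster list and flushing it at gaps) by index arithmetic: one comprehension collects the break indices where the gap reaches the threshold, the boundary list padded with the two ends is zipped with its own tail, and cluster count/first are read off the consecutive boundary pairs whose difference is at least min_size.
import Mathlib
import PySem

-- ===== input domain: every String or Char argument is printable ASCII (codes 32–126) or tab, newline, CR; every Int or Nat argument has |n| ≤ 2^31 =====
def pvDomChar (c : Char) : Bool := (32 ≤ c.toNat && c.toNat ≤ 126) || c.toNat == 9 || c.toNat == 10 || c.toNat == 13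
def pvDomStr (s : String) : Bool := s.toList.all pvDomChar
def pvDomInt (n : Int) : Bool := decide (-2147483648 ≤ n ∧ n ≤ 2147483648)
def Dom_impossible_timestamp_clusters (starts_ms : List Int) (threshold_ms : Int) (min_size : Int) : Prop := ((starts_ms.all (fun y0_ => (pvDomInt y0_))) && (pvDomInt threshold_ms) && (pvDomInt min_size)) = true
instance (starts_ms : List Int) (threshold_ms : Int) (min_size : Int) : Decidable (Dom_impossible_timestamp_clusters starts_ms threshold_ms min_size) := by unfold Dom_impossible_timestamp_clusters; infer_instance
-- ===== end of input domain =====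

-- B replaces A's stateful cluster-growing pass by break-index arithmetic over boundary pairs (alternative, same cost).

-- ===== PORT A =====
-- loop body of A: state = (clusters, first_cluster_ms, current)
def pvAStep (threshold_ms min_size : Int) (s : Int × Option Int × List Int) (start : Int) : Int × Option Int × List Int :=
  let (clusters, first, current) := s
  if current.isEmpty || decide (start - ((PySem.List.pyGet? current (-1)).getD 0) < threshold_ms) then
    (clusters, first, current ++ [start])
  else if (current.length : Int) ≥ min_size then
    (clusters + 1, (if first = none then PySem.List.pyGet? current 0 else first), [start])
  else
    (clusters, first, [start])

def impossible_timestamp_clusters (starts_ms : List Int) (threshold_ms : Int) (min_size : Int) : Int × Option Int :=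
  let s := starts_ms.foldl (pvAStep threshold_ms min_size) (0, none, [])
  let (clusters, first, current) := s
  if (current.length : Int) ≥ min_size then
    (clusters + 1, if first = none then PySem.List.pyGet? current 0 else first)
  else
    (clusters, first)

-- ===== PORT B =====
-- Source B line by line; the comprehension indices i, i-1 are always in range, so
-- pyGetD with default 0 is exact there.
def impossible_timestamp_clusters_alt (starts_ms : List Int) (threshold_ms : Int) (min_size : Int) : Int × Option Int :=
  let n : Int := (starts_ms.length : Int)
  let bounds : List Int :=
    [0] ++ ((PySem.List.pyRange 1 n 1).filter
      (fun i => decide (PySem.List.pyGetD starts_ms i 0 - PySem.List.pyGetD starts_ms (i - 1) 0 ≥ threshold_ms))) ++ [n]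
  let big : List Int :=
    (bounds.zip bounds.tail).filterMap (fun p => if p.2 - p.1 ≥ min_size then some p.1 else none)
  ((big.length : Int), match big with
    | [] => none
    | a :: _ => PySem.List.pyGet? starts_ms a)

-- ===== PRECONDITION & SPEC =====
-- Pre_ excludes only the inputs on which Python A raises IndexError: an empty
-- list together with min_size ≤ 0 (the trailing flush reads the first element of the empty current list).
def Pre_impossible_timestamp_clusters (starts_ms : List Int) (threshold_ms : Int) (min_size : Int) : Prop :=
  starts_ms ≠ [] ∨ 0 < min_size
instance (starts_ms : List Int) (threshold_ms : Int) (min_size : Int) : Decidable (Pre_impossible_timestamp_clusters starts_ms threshold_ms min_size) := by unfold Pre_impossible_timestamp_clusters; infer_instance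
def pvWitness_impossible_timestamp_clusters : List Int × Int × Int := ([0, 10, 20, 300], 100, 3)

def Spec_impossible_timestamp_clusters (starts_ms : List Int) (threshold_ms : Int) (min_size : Int) (out : Int × Option Int) : Prop := out = impossible_timestamp_clusters_alt starts_ms threshold_ms min_size
instance (starts_ms : List Int) (threshold_ms : Int) (min_size : Int) (out : Int × Option Int) : Decidable (Spec_impossible_timestamp_clusters starts_ms threshold_ms min_size out) := by unfold Spec_impossible_timestamp_clusters; infer_instance

-- ===== CLAIM (what is proved, stated in full; the proofs are below) =====
def Claim_equal_impossible_timestamp_clusters : Prop := ∀ (starts_ms : List Int) (threshold_ms : Int) (min_size : Int), Dom_impossible_timestamp_clusters starts_ms threshold_ms min_size → Pre_impossible_timestamp_clusters starts_ms threshold_ms min_size → Spec_impossible_timestamp_clusters starts_ms threshold_ms min_size (impossible_timestamp_clusters starts_ms threshold_ms min_size)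

-- ===== LEMMAS AND PROOFS =====

-- proof-only helpers: the run/segment decomposition both programs implicitly compute
def pvTakeRun (threshold_ms : Int) (prev : Int) : List Int → Int × List Int
  | [] => (0, [])
  | x :: rest =>
    if x - prev < threshold_ms then
      let (n, r) := pvTakeRun threshold_ms x rest
      (n + 1, r)
    else (0, x :: rest)

theorem pvTakeRun_len_le (threshold_ms prev : Int) (xs : List Int) :
    (pvTakeRun threshold_ms prev xs).2.length ≤ xs.length := by
  induction xs generalizing prev with
  | nil => simp [pvTakeRun]
  | cons x rest ih =>
    simp only [pvTakeRun]
    split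
    · exact le_trans (by simpa using ih x) (by simp)
    · simp

def pvSegments (threshold_ms : Int) : List Int → List (Int × Int)
  | [] => []
  | head :: tail =>
    let nr := pvTakeRun threshold_ms head tail
    (head, nr.1 + 1) :: pvSegments threshold_ms nr.2
termination_by xs => xs.length
decreasing_by
  exact Nat.lt_succ_of_le (pvTakeRun_len_le _ _ _)

def pvBStep (min_size : Int) (cf : Int × Option Int) (seg : Int × Int) : Int × Option Int :=
  if seg.2 ≥ min_size then (cf.1 + 1, if cf.2 = none then some seg.1 else cf.2) else cf

theorem pvSegments_nil (t : Int) : pvSegments t [] = [] := by simp [pvSegments]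

theorem pvSegments_cons (t x : Int) (xs : List Int) (n : Int) (r : List Int)
    (hE : pvTakeRun t x xs = (n, r)) :
    pvSegments t (x :: xs) = (x, n + 1) :: pvSegments t r := by
  simp [pvSegments, hE]

-- A equals the pvBStep-fold over the segments (invariant on A's loop)
theorem pvMain (threshold_ms min_size : Int) (xs : List Int) :
    ∀ (cur : List Int) (h p : Int) (c : Int) (f : Option Int),
      cur.head? = some h → cur.getLast? = some p →
      (let s := xs.foldl (pvAStep threshold_ms min_size) (c, f, cur)
       if ((s.2.2.length : Int)) ≥ min_size then
         (s.1 + 1, if s.2.1 = none then PySem.List.pyGet? s.2.2 0 else s.2.1)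
       else (s.1, s.2.1))
      = (let nr := pvTakeRun threshold_ms p xs
         ((h, (cur.length : Int) + nr.1) :: pvSegments threshold_ms nr.2).foldl (pvBStep min_size) (c, f)) := by
  induction xs with
  | nil =>
    intro cur h p c f hh hl
    have h0 : PySem.List.pyGet? cur 0 = some h := by
      cases cur with
      | nil => simp at hh
      | cons a t => simpa [PySem.List.pyGet?_zero_cons] using hh
    simp only [List.foldl_nil, pvTakeRun, pvSegments_nil, List.foldl_cons, add_zero]
    by_cases hm : (cur.length : Int) ≥ min_size
    · simp [pvBStep, hm, h0]
    · simp [pvBStep, hm]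
  | cons x xs ih =>
    intro cur h p c f hh hl
    have hne : cur ≠ [] := by intro e; simp [e] at hh
    have hget : PySem.List.pyGet? cur (-1) = some p := by
      rw [PySem.List.pyGet?_neg_one]; exact hl
    have h0 : PySem.List.pyGet? cur 0 = some h := by
      cases cur with
      | nil => simp at hh
      | cons a t => simpa [PySem.List.pyGet?_zero_cons] using hh
    by_cases hgap : x - p < threshold_ms
    · have hstep : pvAStep threshold_ms min_size (c, f, cur) x = (c, f, cur ++ [x]) := by
        simp [pvAStep, hget, hgap]
      rw [List.foldl_cons, hstep]
      have hh2 : (cur ++ [x]).head? = some h := by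
        cases cur with
        | nil => simp at hh
        | cons a t => simpa using hh
      have hl2 : (cur ++ [x]).getLast? = some x := by simp
      rw [ih (cur ++ [x]) h x c f hh2 hl2]
      have hred : pvTakeRun threshold_ms p (x :: xs)
          = ((pvTakeRun threshold_ms x xs).1 + 1, (pvTakeRun threshold_ms x xs).2) := by
        simp [pvTakeRun, hgap]
      simp only [hred, List.length_append, List.length_cons, List.length_nil]
      congr 3
      push_cast
      ring
    · have hf2 : (if f = none then PySem.List.pyGet? cur 0 else f)
          = (if f = none then some h else f) := by
        split <;> simp [h0]
      have hstep : pvAStep threshold_ms min_size (c, f, cur) x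
          = (if (cur.length : Int) ≥ min_size then
              (c + 1, (if f = none then some h else f), [x])
             else (c, f, [x])) := by
        simp only [pvAStep, hget, Option.getD_some]
        rw [if_neg (by simp [List.isEmpty_eq_false_iff.mpr hne, hgap]), hf2]
      have hred : pvTakeRun threshold_ms p (x :: xs) = (0, x :: xs) := by
        simp [pvTakeRun, hgap]
      rw [List.foldl_cons, hstep]
      simp only [hred, add_zero]
      rcases hE : pvTakeRun threshold_ms x xs with ⟨n, r⟩
      rw [pvSegments_cons threshold_ms x xs n r hE]
      by_cases hm : (cur.length : Int) ≥ min_size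
      · rw [if_pos hm, ih [x] x x (c + 1) (if f = none then some h else f) rfl rfl]
        simp only [hE, List.foldl_cons, List.length_cons, List.length_nil]
        congr 1
        simp only [pvBStep, show ((1 : Nat) : Int) + n = n + 1 from by push_cast; ring]
        simp [hm]
      · rw [if_neg hm, ih [x] x x c f rfl rfl]
        simp only [hE, List.foldl_cons, List.length_cons, List.length_nil]
        congr 1
        simp only [pvBStep, show ((1 : Nat) : Int) + n = n + 1 from by push_cast; ring]
        simp [hm]

-- ===== B-side lemmas =====

-- Nat run length, and pvTakeRun in terms of it
def pvRun (t : Int) (prev : Int) : List Int → Nat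
  | [] => 0
  | x :: rest => if x - prev < t then pvRun t x rest + 1 else 0

theorem pvTakeRun_eq_run (t prev : Int) (xs : List Int) :
    pvTakeRun t prev xs = ((pvRun t prev xs : Int), xs.drop (pvRun t prev xs)) := by
  induction xs generalizing prev with
  | nil => simp [pvTakeRun, pvRun]
  | cons x rest ih =>
    simp only [pvTakeRun, pvRun]
    split
    · rw [ih x]
      simp only [List.drop_succ_cons, Prod.mk.injEq]
      exact ⟨by push_cast; ring, trivial⟩
    · simp

-- gap predicate used by B's comprehension
def pvBrkP (xs : List Int) (t : Int) (i : Int) : Bool :=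
  decide (PySem.List.pyGetD xs i 0 - PySem.List.pyGetD xs (i - 1) 0 ≥ t)

def pvBounds (xs : List Int) (t : Int) : List Int :=
  [0] ++ ((PySem.List.pyRange 1 (xs.length : Int) 1).filter (pvBrkP xs t)) ++ [(xs.length : Int)]

def pvPairs (xs : List Int) (t : Int) : List (Int × Int) :=
  (pvBounds xs t).zip (pvBounds xs t).tail

-- fold characterization of B's phase-2
theorem foldl_pvBStep (m : Int) (L : List (Int × Int)) (c : Int) (f : Option Int) :
    L.foldl (pvBStep m) (c, f)
      = (c + ((L.filter (fun s => decide (s.2 ≥ m))).length : Int),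
         if f = none then ((L.filter (fun s => decide (s.2 ≥ m))).map Prod.fst).head? else f) := by
  induction L generalizing c f with
  | nil => simp
  | cons s L ih =>
    by_cases hs : s.2 ≥ m
    · have hstep : pvBStep m (c, f) s = (c + 1, if f = none then some s.1 else f) := by
        simp [pvBStep, hs]
      rw [List.foldl_cons, hstep, ih]
      cases f with
      | none =>
        simp [hs, Prod.ext_iff]
        push_cast
        ring
      | some v =>
        simp [hs, Prod.ext_iff]
        ring
    · have hstep : pvBStep m (c, f) s = (c, f) := by simp [pvBStep, hs]
      rw [List.foldl_cons, hstep, ih]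
      simp [hs]

-- index shift
theorem pyGetD_cons_shift (x : Int) (tl : List Int) (i : Int) (hi : 0 ≤ i) :
    PySem.List.pyGetD (x :: tl) (i + 1) 0 = PySem.List.pyGetD tl i 0 := by
  obtain ⟨n, rfl⟩ : ∃ n : Nat, i = (n : Int) := ⟨i.toNat, (Int.toNat_of_nonneg hi).symm⟩
  have h1 : (n : Int) + 1 = ((n + 1 : Nat) : Int) := by push_cast; ring
  rw [h1, PySem.List.pyGetD_natCast, PySem.List.pyGetD_natCast, List.getD_cons_succ]

theorem pyGetD_drop_shift (xs : List Int) (k : Nat) (i : Int) (hi : 0 ≤ i) :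
    PySem.List.pyGetD xs (i + (k : Int)) 0 = PySem.List.pyGetD (xs.drop k) i 0 := by
  induction k generalizing xs with
  | zero => simp
  | succ k ih =>
    cases xs with
    | nil => simp [PySem.List.pyGetD, PySem.List.pyGet?]
    | cons x tl =>
      have h1 : i + ((k + 1 : Nat) : Int) = (i + (k : Int)) + 1 := by push_cast; ring
      rw [h1, List.drop_succ_cons, pyGetD_cons_shift x tl _ (by omega), ih tl]

theorem pyRange_shift (a b c : Int) :
    PySem.List.pyRange (a + c) (b + c) 1 = (PySem.List.pyRange a b 1).map (· + c) := by
  rw [PySem.List.pyRange_one, PySem.List.pyRange_one, List.map_map]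
  have h1 : b + c - (a + c) = b - a := by ring
  rw [h1]
  exact List.map_congr_left (fun k _ => by simp; ring)

theorem pvRun_le (t x : Int) (tail : List Int) : pvRun t x tail ≤ tail.length := by
  induction tail generalizing x with
  | nil => simp [pvRun]
  | cons y r ih =>
    simp only [pvRun]
    split
    · exact Nat.succ_le_succ (ih y)
    · simp

theorem pvRun_gap_lt (t : Int) (tail : List Int) : ∀ (x : Int) (j : Nat), j < pvRun t x tail →
    PySem.List.pyGetD (x :: tail) ((j : Int) + 1) 0 - PySem.List.pyGetD (x :: tail) (j : Int) 0 < t := by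
  induction tail with
  | nil => intro x j hj; simp [pvRun] at hj
  | cons y r ih =>
    intro x j hj
    by_cases hlt : y - x < t
    · rw [pvRun, if_pos hlt] at hj
      cases j with
      | zero =>
        simp only [Nat.cast_zero, zero_add]
        rw [show (1 : Int) = (0 : Int) + 1 from by norm_num,
            pyGetD_cons_shift x (y :: r) 0 le_rfl]
        simpa [PySem.List.pyGetD_zero_cons] using hlt
      | succ m =>
        have h1 : ((m + 1 : Nat) : Int) + 1 = (((m : Nat) : Int) + 1) + 1 := by push_cast; ring
        have h2 : ((m + 1 : Nat) : Int) = ((m : Nat) : Int) + 1 := by push_cast; ring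
        rw [h1, pyGetD_cons_shift x (y :: r) _ (by positivity), h2,
            pyGetD_cons_shift x (y :: r) _ (by positivity)]
        exact ih y m (by omega)
    · rw [pvRun, if_neg hlt] at hj
      omega

theorem pvRun_stop (t : Int) (tail : List Int) : ∀ (x : Int), tail.drop (pvRun t x tail) ≠ [] →
    ¬ (PySem.List.pyGetD (x :: tail) ((pvRun t x tail : Int) + 1) 0
        - PySem.List.pyGetD (x :: tail) (pvRun t x tail : Int) 0 < t) := by
  induction tail with
  | nil => intro x h; simp [pvRun] at h
  | cons y r ih =>
    intro x h
    by_cases hlt : y - x < t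
    · rw [pvRun, if_pos hlt] at h ⊢
      rw [List.drop_succ_cons] at h
      have h1 : ((pvRun t y r + 1 : Nat) : Int) + 1 = (((pvRun t y r : Nat) : Int) + 1) + 1 := by
        push_cast; ring
      have h2 : ((pvRun t y r + 1 : Nat) : Int) = ((pvRun t y r : Nat) : Int) + 1 := by
        push_cast; ring
      rw [h1, pyGetD_cons_shift x (y :: r) _ (by positivity), h2,
          pyGetD_cons_shift x (y :: r) _ (by positivity)]
      exact ih y h
    · rw [pvRun, if_neg hlt]
      simp only [Nat.cast_zero, zero_add]
      rw [show (1 : Int) = (0 : Int) + 1 from by norm_num,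
          pyGetD_cons_shift x (y :: r) 0 le_rfl]
      simpa [PySem.List.pyGetD_zero_cons] using hlt

-- breaks of x :: tail, split at the first run
theorem pvBreaks_split (t x : Int) (tail : List Int) :
    (PySem.List.pyRange 1 ((x :: tail).length : Int) 1).filter (pvBrkP (x :: tail) t)
      = (if tail.drop (pvRun t x tail) = [] then []
         else ((pvRun t x tail : Int) + 1)
              :: ((PySem.List.pyRange 1 ((tail.drop (pvRun t x tail)).length : Int) 1).filter
                    (pvBrkP (tail.drop (pvRun t x tail)) t)).map (· + ((pvRun t x tail : Int) + 1))) := by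
  have hkle : pvRun t x tail ≤ tail.length := pvRun_le t x tail
  have hsplit : PySem.List.pyRange 1 ((x :: tail).length : Int) 1
      = PySem.List.pyRange 1 ((pvRun t x tail : Int) + 1) 1
        ++ PySem.List.pyRange ((pvRun t x tail : Int) + 1) ((x :: tail).length : Int) 1 := by
    refine PySem.List.pyRange_one_append 1 _ _ (by omega) ?_
    simp only [List.length_cons]
    push_cast
    omega
  rw [hsplit, List.filter_append]
  have h1 : (PySem.List.pyRange 1 ((pvRun t x tail : Int) + 1) 1).filter (pvBrkP (x :: tail) t) = [] := by
    rw [List.filter_eq_nil_iff]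
    intro i hi
    rw [PySem.List.mem_pyRange_one] at hi
    obtain ⟨j, rfl⟩ : ∃ j : Nat, i = (j : Int) + 1 := ⟨(i - 1).toNat, by omega⟩
    have hgap := pvRun_gap_lt t tail x j (by omega)
    simp only [pvBrkP, add_sub_cancel_right, decide_eq_true_eq]
    omega
  rw [h1, List.nil_append]
  by_cases hre : tail.drop (pvRun t x tail) = []
  · rw [if_pos hre]
    have hkeq : ((x :: tail).length : Int) ≤ (pvRun t x tail : Int) + 1 := by
      have := List.drop_eq_nil_iff.mp hre
      simp only [List.length_cons]
      push_cast
      omega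
    rw [PySem.List.pyRange_one_eq_nil hkeq, List.filter_nil]
  · rw [if_neg hre]
    have hklt : pvRun t x tail < tail.length := by
      rcases Nat.lt_or_ge (pvRun t x tail) tail.length with h | h
      · exact h
      · exact absurd (List.drop_eq_nil_iff.mpr h) hre
    have hkn : (pvRun t x tail : Int) + 1 < ((x :: tail).length : Int) := by
      simp only [List.length_cons]; push_cast; omega
    rw [PySem.List.pyRange_one_cons hkn, List.filter_cons]
    have hP : pvBrkP (x :: tail) t ((pvRun t x tail : Int) + 1) = true := by
      have := pvRun_stop t tail x hre
      simp only [pvBrkP, add_sub_cancel_right, decide_eq_true_eq]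
      omega
    rw [hP]
    simp only [if_true]
    congr 1
    have hlen : ((x :: tail).length : Int)
        = ((tail.drop (pvRun t x tail)).length : Int) + ((pvRun t x tail : Int) + 1) := by
      simp only [List.length_cons, List.length_drop]
      push_cast [hkle]
      omega
    have hone : (pvRun t x tail : Int) + 1 + 1 = 1 + ((pvRun t x tail : Int) + 1) := by ring
    rw [hlen, hone, pyRange_shift 1 ((tail.drop (pvRun t x tail)).length : Int) ((pvRun t x tail : Int) + 1),
        List.filter_map]
    congr 1
    refine List.filter_congr ?_
    intro i hi
    rw [PySem.List.mem_pyRange_one] at hi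
    have hdrop : (x :: tail).drop (pvRun t x tail + 1) = tail.drop (pvRun t x tail) := by
      rw [List.drop_succ_cons]
    have hcast : ((pvRun t x tail + 1 : Nat) : Int) = (pvRun t x tail : Int) + 1 := by push_cast; ring
    have e1 : PySem.List.pyGetD (x :: tail) (i + ((pvRun t x tail : Int) + 1)) 0
        = PySem.List.pyGetD (tail.drop (pvRun t x tail)) i 0 := by
      rw [← hcast, pyGetD_drop_shift (x :: tail) (pvRun t x tail + 1) i (by omega), hdrop]
    have e2 : PySem.List.pyGetD (x :: tail) (i + ((pvRun t x tail : Int) + 1) - 1) 0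
        = PySem.List.pyGetD (tail.drop (pvRun t x tail)) (i - 1) 0 := by
      have : i + ((pvRun t x tail : Int) + 1) - 1 = (i - 1) + ((pvRun t x tail + 1 : Nat) : Int) := by
        rw [hcast]; ring
      rw [this, pyGetD_drop_shift (x :: tail) (pvRun t x tail + 1) (i - 1) (by omega), hdrop]
    simp only [Function.comp, pvBrkP, e1, e2]

theorem zip_tail_map (f : Int → Int) (l : List Int) :
    ((l.map f).zip (l.map f).tail) = (l.zip l.tail).map (Prod.map f f) := by
  cases l with
  | nil => simp
  | cons a l =>
    simp only [List.map_cons, List.tail_cons]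
    rw [← List.map_cons, List.zip_map]

theorem pvBounds_nonneg (xs : List Int) (t : Int) : ∀ a ∈ pvBounds xs t, 0 ≤ a := by
  intro a ha
  rw [pvBounds] at ha
  simp only [List.cons_append, List.nil_append, List.mem_cons] at ha
  rcases ha with rfl | ha
  · exact le_rfl
  rw [List.mem_append] at ha
  rcases ha with ha | ha
  · have h := (List.mem_filter.mp ha).1
    rw [PySem.List.mem_pyRange_one] at h
    omega
  · rw [List.mem_singleton] at ha
    subst ha
    exact Int.natCast_nonneg _

-- segments equal boundary pairs
theorem pvSegments_eq_pairs_aux (t : Int) (N : Nat) : ∀ (xs : List Int), xs.length ≤ N → xs ≠ [] →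
    pvSegments t xs
      = (pvPairs xs t).map (fun p => (PySem.List.pyGetD xs p.1 0, p.2 - p.1)) := by
  induction N with
  | zero => intro xs hN hne; cases xs with
    | nil => exact absurd rfl hne
    | cons a b => simp at hN
  | succ N ih =>
    intro xs hN hne
    cases xs with
    | nil => exact absurd rfl hne
    | cons x tail =>
      have hkle : pvRun t x tail ≤ tail.length := pvRun_le t x tail
      have hseg : pvSegments t (x :: tail)
          = (x, (pvRun t x tail : Int) + 1) :: pvSegments t (tail.drop (pvRun t x tail)) :=
        pvSegments_cons t x tail _ _ (pvTakeRun_eq_run t x tail)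
      by_cases hre : tail.drop (pvRun t x tail) = []
      · have hkeq : pvRun t x tail = tail.length := by
          have := List.drop_eq_nil_iff.mp hre
          omega
        have hbounds : pvBounds (x :: tail) t = [0, ((x :: tail).length : Int)] := by
          simp only [pvBounds, pvBreaks_split t x tail, if_pos hre]
          rfl
        rw [hseg, hre, pvSegments_nil]
        simp only [pvPairs, hbounds]
        simp only [List.zip_cons_cons, List.tail_cons, List.zip_nil_right, List.map_cons,
          List.map_nil, List.zip_cons_cons, PySem.List.pyGetD_zero_cons]
        simp only [List.length_cons, hkeq]
        push_cast
        ring_nf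
      · have hklt : pvRun t x tail < tail.length := by
          rcases Nat.lt_or_ge (pvRun t x tail) tail.length with h | h
          · exact h
          · exact absurd (List.drop_eq_nil_iff.mpr h) hre
        have hlen : ((x :: tail).length : Int)
            = ((tail.drop (pvRun t x tail)).length : Int) + ((pvRun t x tail : Int) + 1) := by
          simp only [List.length_cons, List.length_drop]
          push_cast [hkle]
          omega
        have hboundsr : pvBounds (x :: tail) t
            = 0 :: (pvBounds (tail.drop (pvRun t x tail)) t).map (· + ((pvRun t x tail : Int) + 1)) := by
          simp only [pvBounds, pvBreaks_split t x tail, if_neg hre]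
          rw [hlen]
          simp only [List.cons_append, List.nil_append, List.map_cons, List.map_append,
            List.map_nil, zero_add]
        have hpairs : pvPairs (x :: tail) t
            = (0, (pvRun t x tail : Int) + 1)
              :: (pvPairs (tail.drop (pvRun t x tail)) t).map
                   (Prod.map (· + ((pvRun t x tail : Int) + 1)) (· + ((pvRun t x tail : Int) + 1))) := by
          obtain ⟨B', hB'⟩ : ∃ B', pvBounds (tail.drop (pvRun t x tail)) t = 0 :: B' :=
            ⟨_, rfl⟩
          rw [pvPairs, hboundsr, List.tail_cons, hB', List.map_cons, List.zip_cons_cons,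
              show ((0 : Int) + ((pvRun t x tail : Int) + 1))
                    :: List.map (· + ((pvRun t x tail : Int) + 1)) B'
                  = List.map (· + ((pvRun t x tail : Int) + 1)) (0 :: B') from rfl,
              ← hB']
          have htl : List.map (· + ((pvRun t x tail : Int) + 1)) B'
              = (List.map (· + ((pvRun t x tail : Int) + 1))
                  (pvBounds (tail.drop (pvRun t x tail)) t)).tail := by
            rw [hB']; simp
          rw [htl, zip_tail_map, ← pvPairs]
          simp
        rw [hseg, hpairs]
        simp only [List.map_cons]
        congr 1
        · simp [PySem.List.pyGetD_zero_cons]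
        · rw [ih (tail.drop (pvRun t x tail)) (by simp at hN ⊢; omega) hre, List.map_map]
          refine List.map_congr_left ?_
          intro p hp
          have hp1 : p.1 ∈ pvBounds (tail.drop (pvRun t x tail)) t :=
            (List.of_mem_zip hp).1
          have hp1n : 0 ≤ p.1 := pvBounds_nonneg _ t p.1 hp1
          have hcast : ((pvRun t x tail + 1 : Nat) : Int) = (pvRun t x tail : Int) + 1 := by
            push_cast; ring
          simp only [Function.comp, Prod.map]
          rw [← hcast, pyGetD_drop_shift (x :: tail) (pvRun t x tail + 1) p.1 hp1n,
              List.drop_succ_cons]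
          simp only [Prod.mk.injEq, true_and]
          ring

theorem pvSegments_eq_pairs (t : Int) (xs : List Int) (hne : xs ≠ []) :
    pvSegments t xs
      = (pvPairs xs t).map (fun p => (PySem.List.pyGetD xs p.1 0, p.2 - p.1)) :=
  pvSegments_eq_pairs_aux t xs.length xs le_rfl hne

def pvBig (xs : List Int) (t m : Int) : List Int :=
  (pvPairs xs t).filterMap (fun p => if p.2 - p.1 ≥ m then some p.1 else none)

theorem alt_eq (xs : List Int) (t m : Int) :
    impossible_timestamp_clusters_alt xs t m
      = (((pvBig xs t m).length : Int),
          match pvBig xs t m with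
          | [] => none
          | a :: _ => PySem.List.pyGet? xs a) := rfl

theorem filterMap_if_eq_map_filter (m : Int) (L : List (Int × Int)) :
    L.filterMap (fun p => if p.2 - p.1 ≥ m then some p.1 else none)
      = (L.filter (fun p => decide (p.2 - p.1 ≥ m))).map Prod.fst := by
  induction L with
  | nil => simp
  | cons q L ih =>
    by_cases hq : q.2 - q.1 ≥ m
    · simp [hq, ih]
    · simp [hq, ih]

theorem pvBounds_le (xs : List Int) (t : Int) : ∀ a ∈ pvBounds xs t, a ≤ (xs.length : Int) := by
  intro a ha
  rw [pvBounds] at ha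
  simp only [List.cons_append, List.nil_append, List.mem_cons] at ha
  rcases ha with rfl | ha
  · exact Int.natCast_nonneg _
  rw [List.mem_append] at ha
  rcases ha with ha | ha
  · have h := (List.mem_filter.mp ha).1
    rw [PySem.List.mem_pyRange_one] at h
    omega
  · rw [List.mem_singleton] at ha
    omega

theorem pvBounds_pairwise (xs : List Int) (t : Int) (hne : xs ≠ []) :
    (pvBounds xs t).Pairwise (· < ·) := by
  have hn : 0 < (xs.length : Int) := by
    cases xs with
    | nil => exact absurd rfl hne
    | cons a b => simp only [List.length_cons]; positivity
  rw [pvBounds]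
  simp only [List.cons_append, List.nil_append]
  refine List.Pairwise.cons ?_ ?_
  · intro b hb
    rw [List.mem_append] at hb
    rcases hb with hb | hb
    · have h := (List.mem_filter.mp hb).1
      rw [PySem.List.mem_pyRange_one] at h
      omega
    · rw [List.mem_singleton] at hb
      omega
  · rw [List.pairwise_append]
    refine ⟨List.Pairwise.filter _ (PySem.List.pairwise_lt_pyRange_one 1 _), ?_, ?_⟩
    · simp
    · intro a ha b hb
      have h := (List.mem_filter.mp ha).1
      rw [PySem.List.mem_pyRange_one] at h
      rw [List.mem_singleton] at hb
      omega

theorem pairwise_zip_tail {R : Int → Int → Prop} : ∀ (l : List Int), l.Pairwise R →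
    ∀ p ∈ l.zip l.tail, R p.1 p.2 := by
  intro l
  induction l with
  | nil => intro _ p hp; simp at hp
  | cons a l ih =>
    intro h p hp
    cases l with
    | nil => simp at hp
    | cons b r =>
      simp only [List.tail_cons, List.zip_cons_cons, List.mem_cons] at hp
      rcases hp with rfl | hp
      · exact (List.pairwise_cons.mp h).1 b (by simp)
      · exact ih (List.pairwise_cons.mp h).2 p (by simpa using hp)

theorem pvPairs_head_range (xs : List Int) (t : Int) (hne : xs ≠ []) :
    ∀ p ∈ pvPairs xs t, 0 ≤ p.1 ∧ p.1 < (xs.length : Int) := by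
  intro p hp
  have h1 : p.1 ∈ pvBounds xs t := (List.of_mem_zip hp).1
  have h2 : p.2 ∈ pvBounds xs t := List.mem_of_mem_tail (List.of_mem_zip hp).2
  have hlt : p.1 < p.2 := pairwise_zip_tail (pvBounds xs t) (pvBounds_pairwise xs t hne) p hp
  exact ⟨pvBounds_nonneg xs t p.1 h1, lt_of_lt_of_le hlt (pvBounds_le xs t p.2 h2)⟩

-- ===== VERDICT (by name: the statement is the Claim_ definition above) =====
theorem impossible_timestamp_clusters_spec : Claim_equal_impossible_timestamp_clusters := by
  intro starts_ms threshold_ms min_size _ hpre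
  unfold Spec_impossible_timestamp_clusters
  cases starts_ms with
  | nil =>
    have hms : 0 < min_size := by
      rcases hpre with h | h
      · exact absurd rfl h
      · exact h
    have hno : ¬ ((0 : Int) - 0 ≥ min_size) := by omega
    have hno2 : ¬ ((0 : Int) ≥ min_size) := by omega
    simp [impossible_timestamp_clusters, impossible_timestamp_clusters_alt,
      PySem.List.pyRange_one_eq_nil (show (0 : Int) ≤ 1 by norm_num), hno2]
  | cons x tl =>
    have hne : (x :: tl : List Int) ≠ [] := by simp
    -- A equals the fold over the segments
    have hA : impossible_timestamp_clusters (x :: tl) threshold_ms min_size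
        = (pvSegments threshold_ms (x :: tl)).foldl (pvBStep min_size) (0, none) := by
      have h1 : impossible_timestamp_clusters (x :: tl) threshold_ms min_size
          = (let s := tl.foldl (pvAStep threshold_ms min_size) (0, none, [x])
             if ((s.2.2.length : Int)) ≥ min_size then
               (s.1 + 1, if s.2.1 = none then PySem.List.pyGet? s.2.2 0 else s.2.1)
             else (s.1, s.2.1)) := by
        simp only [impossible_timestamp_clusters, List.foldl_cons]
        have : pvAStep threshold_ms min_size (0, none, []) x = (0, none, [x]) := by
          simp [pvAStep]
        rw [this]
      rw [h1, pvMain threshold_ms min_size tl [x] x x 0 none rfl rfl]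
      rcases hE : pvTakeRun threshold_ms x tl with ⟨n, r⟩
      rw [pvSegments_cons threshold_ms x tl n r hE]
      simp only [List.foldl_cons, List.length_cons, List.length_nil]
      rw [show ((1 : Nat) : Int) + n = n + 1 from by push_cast; ring]
    rw [hA, pvSegments_eq_pairs threshold_ms (x :: tl) hne, foldl_pvBStep, alt_eq]
    rw [List.filter_map, List.map_map]
    have hcomp : (List.filter
          ((fun s : Int × Int => decide (s.2 ≥ min_size))
            ∘ (fun p : Int × Int => (PySem.List.pyGetD (x :: tl) p.1 0, p.2 - p.1)))
          (pvPairs (x :: tl) threshold_ms))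
        = List.filter (fun p : Int × Int => decide (p.2 - p.1 ≥ min_size))
            (pvPairs (x :: tl) threshold_ms) :=
      List.filter_congr (fun p _ => rfl)
    rw [hcomp]
    rw [show pvBig (x :: tl) threshold_ms min_size
          = (List.filter (fun p : Int × Int => decide (p.2 - p.1 ≥ min_size))
              (pvPairs (x :: tl) threshold_ms)).map Prod.fst from
        filterMap_if_eq_map_filter min_size (pvPairs (x :: tl) threshold_ms)]
    rcases hQ : List.filter (fun p : Int × Int => decide (p.2 - p.1 ≥ min_size))
        (pvPairs (x :: tl) threshold_ms) with _ | ⟨q, Q⟩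
    · simp
    · have hqmem : q ∈ pvPairs (x :: tl) threshold_ms := by
        have : q ∈ q :: Q := by simp
        rw [← hQ] at this
        exact List.mem_of_mem_filter this
      obtain ⟨hq0, hqn⟩ := pvPairs_head_range (x :: tl) threshold_ms hne q hqmem
      simp only [List.map_cons, List.length_cons, List.head?_cons, zero_add,
        Prod.mk.injEq]
      constructor
      · simp
      · simp only [if_true, Function.comp_apply]
        rw [PySem.List.pyGet?_eq_some_getElem (x :: tl) hq0 hqn,
            PySem.List.pyGetD_eq_getElem (x :: tl) 0 hq0 hqn]
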